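-- pv_equiv track=rewrite | github.com/Tesserjo/advent_of_code_2021 | day8/main.py | count_uniques
-- ===== SOURCE A (Python) =====
-- def count_uniques(list):
--     one = 0
--     four = 0
--     seven = 0
--     eight = 0
--     for i in list:
--         for j in i:
--             if len(j) == 2:
--                 one += 1
--             elif len(j) == 3:
--                 seven += 1
--             elif len(j) == 4:
--                 four += 1
--             elif len(j) == 7:
--                 eight += 1
--     return one + four + seven + eight
-- ===== SOURCE B (Python) =====
-- def count_uniques(list):
--     if not list:
--         return 0
--     row, *rest = list
--     return sum(len(s) in (2, 3, 4, 7) for s in row) + count_uniques(rest)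
-- ===== Notes on version B (the rewrite author's own statement) =====
-- stated objective: simpler
-- what changed: B is recursive on the list of rows and scores each row as a sum of booleans of one membership test len(s) in (2,3,4,7), replacing A's iterative nested loops that maintain four separate named counters through an if/elif chain.
import Mathlib
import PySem

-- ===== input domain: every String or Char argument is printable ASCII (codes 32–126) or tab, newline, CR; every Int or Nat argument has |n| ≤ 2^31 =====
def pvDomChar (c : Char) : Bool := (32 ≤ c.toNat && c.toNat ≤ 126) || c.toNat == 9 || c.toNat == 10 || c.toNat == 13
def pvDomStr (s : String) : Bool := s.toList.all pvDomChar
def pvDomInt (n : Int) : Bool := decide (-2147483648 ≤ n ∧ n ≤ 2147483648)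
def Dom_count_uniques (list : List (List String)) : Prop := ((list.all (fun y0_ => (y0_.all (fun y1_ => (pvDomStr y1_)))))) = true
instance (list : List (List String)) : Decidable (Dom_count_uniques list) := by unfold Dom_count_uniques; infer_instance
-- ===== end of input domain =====

-- B replaces A's iterative nested loops with four counters by structural recursion on the rows,
-- each row scored as a count of one membership test len(s) in (2,3,4,7) (simpler decomposition, same cost).
-- ===== PORT A =====
-- A: nested loops maintaining four counters, summed at the end.
def count_uniques (list : List (List String)) : Int :=
  let st := list.foldl (fun (st : Int × Int × Int × Int) i =>
    i.foldl (fun st j =>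
      let (one, four, seven, eight) := st
      if PySem.Str.len j = 2 then (one + 1, four, seven, eight)
      else if PySem.Str.len j = 3 then (one, four, seven + 1, eight)
      else if PySem.Str.len j = 4 then (one, four + 1, seven, eight)
      else if PySem.Str.len j = 7 then (one, four, seven, eight + 1)
      else (one, four, seven, eight)) st) (0, 0, 0, 0)
  st.1 + st.2.1 + st.2.2.1 + st.2.2.2

-- ===== PORT B =====
-- B: recursion on the rows; sum of booleans of a membership test = countP over the row.
def count_uniques_alt : List (List String) → Int
  | [] => 0
  | row :: rest =>
      (row.countP (fun s => [(2 : Int), 3, 4, 7].contains (PySem.Str.len s)) : Int)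
        + count_uniques_alt rest

-- ===== PRECONDITION & SPEC =====
def Spec_count_uniques (list : List (List String)) (out : Int) : Prop := out = count_uniques_alt list
instance (list : List (List String)) (out : Int) : Decidable (Spec_count_uniques list out) := by unfold Spec_count_uniques; infer_instance

-- ===== CLAIM (what is proved, stated in full; the proofs are below) =====
def Claim_equal_count_uniques : Prop := ∀ (list : List (List String)), Dom_count_uniques list → Spec_count_uniques list (count_uniques list)

-- ===== LEMMAS AND PROOFS =====

-- ===== VERDICT (by name: the statement is the Claim_ definition above) =====
-- A's inner loop, from any start state: each counter grows by the count of its length.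
theorem pv_inner (i : List String) (st : Int × Int × Int × Int) :
    i.foldl (fun st j =>
      let (one, four, seven, eight) := st
      if PySem.Str.len j = 2 then (one + 1, four, seven, eight)
      else if PySem.Str.len j = 3 then (one, four, seven + 1, eight)
      else if PySem.Str.len j = 4 then (one, four + 1, seven, eight)
      else if PySem.Str.len j = 7 then (one, four, seven, eight + 1)
      else (one, four, seven, eight)) st
    = (st.1 + (i.countP (fun j => PySem.Str.len j == 2) : Int),
       st.2.1 + (i.countP (fun j => PySem.Str.len j == 4) : Int),
       st.2.2.1 + (i.countP (fun j => PySem.Str.len j == 3) : Int),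
       st.2.2.2 + (i.countP (fun j => PySem.Str.len j == 7) : Int)) := by
  induction i generalizing st with
  | nil => simp
  | cons j tl ih =>
    obtain ⟨one, four, seven, eight⟩ := st
    simp only [List.foldl_cons]
    rw [ih]
    simp only [List.countP_cons, beq_iff_eq, Prod.mk.injEq]
    split_ifs <;> (refine ⟨?_, ?_, ?_, ?_⟩ <;> push_cast <;> omega)

-- Per row, A's four length-counts sum to B's one membership count.
theorem pv_row (i : List String) :
    (i.countP (fun j => PySem.Str.len j == 2) : Int)
      + (i.countP (fun j => PySem.Str.len j == 4) : Int)
      + (i.countP (fun j => PySem.Str.len j == 3) : Int)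
      + (i.countP (fun j => PySem.Str.len j == 7) : Int)
    = (i.countP (fun s => [(2 : Int), 3, 4, 7].contains (PySem.Str.len s)) : Int) := by
  induction i with
  | nil => simp
  | cons j tl ih =>
    simp only [List.countP_cons]
    push_cast
    rw [← ih]
    have hcon : ([(2 : Int), 3, 4, 7].contains (PySem.Str.len j))
        = (PySem.Str.len j == 2 || PySem.Str.len j == 3 || PySem.Str.len j == 4 || PySem.Str.len j == 7) := by
      simp [Bool.or_assoc, beq_eq_decide]
    rw [hcon]
    by_cases h2 : PySem.Str.len j = 2 <;> by_cases h3 : PySem.Str.len j = 3 <;>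
      by_cases h4 : PySem.Str.len j = 4 <;> by_cases h7 : PySem.Str.len j = 7 <;>
      simp only [h2, h3, h4, h7, beq_iff_eq, if_true, if_false, beq_self_eq_true,
        Bool.or_true, Bool.true_or] <;>
      simp_all <;> omega

-- A's outer loop from any start state, against B's recursion.
theorem pv_outer (l : List (List String)) (st : Int × Int × Int × Int) :
    (let r := l.foldl (fun (st : Int × Int × Int × Int) i =>
      i.foldl (fun st j =>
        let (one, four, seven, eight) := st
        if PySem.Str.len j = 2 then (one + 1, four, seven, eight)
        else if PySem.Str.len j = 3 then (one, four, seven + 1, eight)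
        else if PySem.Str.len j = 4 then (one, four + 1, seven, eight)
        else if PySem.Str.len j = 7 then (one, four, seven, eight + 1)
        else (one, four, seven, eight)) st) st
     r.1 + r.2.1 + r.2.2.1 + r.2.2.2)
    = st.1 + st.2.1 + st.2.2.1 + st.2.2.2 + count_uniques_alt l := by
  induction l generalizing st with
  | nil => simp [count_uniques_alt]
  | cons i tl ih =>
    simp only [List.foldl_cons] at *
    rw [pv_inner]
    rw [ih]
    simp only [count_uniques_alt]
    have := pv_row i
    omega

-- ===== VERDICT (by name: the statement is the Claim_ definition above) =====
theorem count_uniques_spec : Claim_equal_count_uniques := by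
  intro l _
  unfold Spec_count_uniques count_uniques
  have := pv_outer l (0, 0, 0, 0)
  simpa using this
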